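-- pv_equiv track=rewrite | github.com/GuardifyAI/Guardify-AI | backend/services/event_description_service.py | _get_fallback_description
-- ===== SOURCE A (Python) =====
-- def _get_fallback_description(decision_reasoning: str) -> str:
--     """
--     Generate a fallback description focusing on observable actions.
--
--     Args:
--         decision_reasoning (str): The decision reasoning to analyze
--
--     Returns:
--         str: Simple fallback description of observed activity
--     """
--     if not decision_reasoning:
--         return "Customer in store"
--
--     text = decision_reasoning.lower()
--
--     # Extract key observable activities
--     if any(keyword in text for keyword in ['phone', 'smartphone', 'mobile', 'screen']):
--         return "Person checking phone"
--
--     elif any(keyword in text for keyword in ['pocket', 'putting', 'placed in', 'concealed']):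
--         return "Person putting item in pocket"
--
--     elif any(keyword in text for keyword in ['examining', 'looking at', 'inspecting', 'product']):
--         return "Customer examining products"
--
--     elif any(keyword in text for keyword in ['browsing', 'walking', 'moving through']):
--         return "Customer browsing store"
--
--     elif any(keyword in text for keyword in ['basket', 'cart', 'shopping']):
--         return "Person with shopping basket"
--
--     elif any(keyword in text for keyword in ['comparing', 'selecting']):
--         return "Customer selecting products"
--
--     elif any(keyword in text for keyword in ['checkout', 'cashier', 'paying']):
--         return "Customer at checkout"
--
--     elif any(keyword in text for keyword in ['clothing', 'trying on', 'fitting']):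
--         return "Customer examining clothing"
--
--     # Generic fallback based on common activities
--     else:
--         return "Customer in store"
-- ===== SOURCE B (Python) =====
-- _DESCRIPTIONS = [
--     "Person checking phone",
--     "Person putting item in pocket",
--     "Customer examining products",
--     "Customer browsing store",
--     "Person with shopping basket",
--     "Customer selecting products",
--     "Customer at checkout",
--     "Customer examining clothing",
-- ]
--
-- _PAIRS = [
--     ('phone', 0), ('smartphone', 0), ('mobile', 0), ('screen', 0),
--     ('pocket', 1), ('putting', 1), ('placed in', 1), ('concealed', 1),
--     ('examining', 2), ('looking at', 2), ('inspecting', 2), ('product', 2),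
--     ('browsing', 3), ('walking', 3), ('moving through', 3),
--     ('basket', 4), ('cart', 4), ('shopping', 4),
--     ('comparing', 5), ('selecting', 5),
--     ('checkout', 6), ('cashier', 6), ('paying', 6),
--     ('clothing', 7), ('trying on', 7), ('fitting', 7),
-- ]
--
-- def _get_fallback_description(decision_reasoning: str) -> str:
--     if not decision_reasoning:
--         return "Customer in store"
--     text = decision_reasoning.lower()
--     matched = [pri for kw, pri in _PAIRS if kw in text]
--     if not matched:
--         return "Customer in store"
--     return _DESCRIPTIONS[min(matched)]
-- ===== Notes on version B (the rewrite author's own statement) =====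
-- stated objective: alternative
-- what changed: Instead of an ordered first-match if/elif chain with short-circuiting any() per group, B collects the priority of every matching keyword across all flat (keyword, priority) pairs and reduces by min, indexing a description array with the minimum priority; the priority order is recovered arithmetically rather than by control flow.
import Mathlib
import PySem

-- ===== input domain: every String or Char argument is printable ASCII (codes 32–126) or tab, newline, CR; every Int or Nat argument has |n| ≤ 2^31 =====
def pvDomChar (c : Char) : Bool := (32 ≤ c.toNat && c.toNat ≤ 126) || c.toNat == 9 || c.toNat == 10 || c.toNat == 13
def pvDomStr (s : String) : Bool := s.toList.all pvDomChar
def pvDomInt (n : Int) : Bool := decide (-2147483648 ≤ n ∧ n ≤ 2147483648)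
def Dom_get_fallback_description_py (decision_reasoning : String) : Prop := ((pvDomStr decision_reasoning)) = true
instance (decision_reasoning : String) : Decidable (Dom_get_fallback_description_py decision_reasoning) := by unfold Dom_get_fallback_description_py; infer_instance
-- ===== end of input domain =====

-- B replaces A's ordered if/elif chain by a flat scan that collects the priority of every matching keyword and reduces with min, indexing a description table; same cost, a reduction instead of control flow.


-- ===== PORT A =====
def get_fallback_description_py (decision_reasoning : String) : String :=
  if decision_reasoning = "" then "Customer in store"
  else
    let text := PySem.Str.lower decision_reasoning
    if ["phone", "smartphone", "mobile", "screen"].any (fun kw => PySem.Str.isIn kw text) then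
      "Person checking phone"
    else if ["pocket", "putting", "placed in", "concealed"].any (fun kw => PySem.Str.isIn kw text) then
      "Person putting item in pocket"
    else if ["examining", "looking at", "inspecting", "product"].any (fun kw => PySem.Str.isIn kw text) then
      "Customer examining products"
    else if ["browsing", "walking", "moving through"].any (fun kw => PySem.Str.isIn kw text) then
      "Customer browsing store"
    else if ["basket", "cart", "shopping"].any (fun kw => PySem.Str.isIn kw text) then
      "Person with shopping basket"
    else if ["comparing", "selecting"].any (fun kw => PySem.Str.isIn kw text) then
      "Customer selecting products"
    else if ["checkout", "cashier", "paying"].any (fun kw => PySem.Str.isIn kw text) then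
      "Customer at checkout"
    else if ["clothing", "trying on", "fitting"].any (fun kw => PySem.Str.isIn kw text) then
      "Customer examining clothing"
    else
      "Customer in store"

-- ===== PORT B =====
-- B's description table, indexed by priority (_DESCRIPTIONS)
def pvDescriptions : List String :=
  [ "Person checking phone",
    "Person putting item in pocket",
    "Customer examining products",
    "Customer browsing store",
    "Person with shopping basket",
    "Customer selecting products",
    "Customer at checkout",
    "Customer examining clothing" ]

-- B's flat (keyword, priority) pairs (_PAIRS)
def pvPairs : List (String × Nat) :=
  [ ("phone", 0), ("smartphone", 0), ("mobile", 0), ("screen", 0),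
    ("pocket", 1), ("putting", 1), ("placed in", 1), ("concealed", 1),
    ("examining", 2), ("looking at", 2), ("inspecting", 2), ("product", 2),
    ("browsing", 3), ("walking", 3), ("moving through", 3),
    ("basket", 4), ("cart", 4), ("shopping", 4),
    ("comparing", 5), ("selecting", 5),
    ("checkout", 6), ("cashier", 6), ("paying", 6),
    ("clothing", 7), ("trying on", 7), ("fitting", 7) ]

def get_fallback_description_py_alt (decision_reasoning : String) : String :=
  if decision_reasoning = "" then "Customer in store"
  else
    let text := PySem.Str.lower decision_reasoning
    let matched := pvPairs.filterMap (fun p => if PySem.Str.isIn p.1 text then some p.2 else none)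
    match PySem.List.min? matched (fun x => x) with
    | none => "Customer in store"                -- "if not matched" branch: min? is none exactly on []
    | some m => pvDescriptions.getD m "Customer in store"   -- _DESCRIPTIONS[min(matched)], index always in range

-- ===== PRECONDITION & SPEC =====
def Spec_get_fallback_description_py (decision_reasoning : String) (out : String) : Prop := out = get_fallback_description_py_alt decision_reasoning
instance (decision_reasoning : String) (out : String) : Decidable (Spec_get_fallback_description_py decision_reasoning out) := by unfold Spec_get_fallback_description_py; infer_instance

-- ===== CLAIM (what is proved, stated in full; the proofs are below) =====
def Claim_equal_get_fallback_description_py : Prop := ∀ (decision_reasoning : String), Dom_get_fallback_description_py decision_reasoning → Spec_get_fallback_description_py decision_reasoning (get_fallback_description_py decision_reasoning)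

-- ===== LEMMAS AND PROOFS =====

-- proof-side view of the keyword table as A's ordered groups
def pvGroups : List (List String × String) :=
  [ (["phone", "smartphone", "mobile", "screen"], "Person checking phone"),
    (["pocket", "putting", "placed in", "concealed"], "Person putting item in pocket"),
    (["examining", "looking at", "inspecting", "product"], "Customer examining products"),
    (["browsing", "walking", "moving through"], "Customer browsing store"),
    (["basket", "cart", "shopping"], "Person with shopping basket"),
    (["comparing", "selecting"], "Customer selecting products"),
    (["checkout", "cashier", "paying"], "Customer at checkout"),
    (["clothing", "trying on", "fitting"], "Customer examining clothing") ]

-- priorities of matching keywords, group by group starting at offset off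
def pvFlat (text : String) : List (List String × String) → Nat → List Nat
  | [], _ => []
  | g :: rest, off =>
      g.1.filterMap (fun kw => if PySem.Str.isIn kw text then some off else none)
        ++ pvFlat text rest (off + 1)

-- index of the first group with a matching keyword
def pvFirstIdx (text : String) : List (List String × String) → Nat → Option Nat
  | [], _ => none
  | g :: rest, off =>
      if g.1.any (fun kw => PySem.Str.isIn kw text) then some off
      else pvFirstIdx text rest (off + 1)

-- the same table as flat (keyword, priority) pairs, built group by group
def pvPairsOf : List (List String × String) → Nat → List (String × Nat)
  | [], _ => []
  | g :: rest, off => g.1.map (fun kw => (kw, off)) ++ pvPairsOf rest (off + 1)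

theorem pvPairsOf_groups : pvPairsOf pvGroups 0 = pvPairs := by
  simp [pvPairsOf, pvGroups, pvPairs]

theorem pvFlat_eq_filterMap (text : String) (gs : List (List String × String)) :
    ∀ off, (pvPairsOf gs off).filterMap
        (fun p => if PySem.Str.isIn p.1 text then some p.2 else none) = pvFlat text gs off := by
  induction gs with
  | nil => intro off; simp [pvPairsOf, pvFlat]
  | cons g rest ih =>
    intro off
    simp only [pvPairsOf, pvFlat, List.filterMap_append, List.filterMap_map, ih]
    rfl

theorem pvFlat_lb (text : String) (gs : List (List String × String)) :
    ∀ off, ∀ a ∈ pvFlat text gs off, off ≤ a := by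
  induction gs with
  | nil => intro off a ha; simp [pvFlat] at ha
  | cons g rest ih =>
    intro off a ha
    simp only [pvFlat, List.mem_append, List.mem_filterMap] at ha
    rcases ha with ⟨kw, _, hkw⟩ | h
    · split at hkw
      · exact Nat.le_of_eq (Option.some.inj hkw)
      · exact absurd hkw (by simp)
    · exact Nat.le_of_succ_le (ih (off + 1) a h)

theorem pvMin_flat_eq (text : String) (gs : List (List String × String)) :
    ∀ off, PySem.List.min? (pvFlat text gs off) (fun x => x) = pvFirstIdx text gs off := by
  induction gs with
  | nil => intro off; simp [pvFlat, pvFirstIdx, PySem.List.min?]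
  | cons g rest ih =>
    intro off
    simp only [pvFlat, pvFirstIdx]
    by_cases h : g.1.any (fun kw => PySem.Str.isIn kw text) = true
    · rw [if_pos h]
      obtain ⟨kw, hmem, hkw⟩ := List.any_eq_true.mp h
      have hoff : off ∈ g.1.filterMap (fun kw => if PySem.Str.isIn kw text then some off else none)
          ++ pvFlat text rest (off + 1) := by
        refine List.mem_append_left _ (List.mem_filterMap.mpr ⟨kw, hmem, ?_⟩)
        rw [if_pos hkw]
      have hlb : ∀ a ∈ g.1.filterMap (fun kw => if PySem.Str.isIn kw text then some off else none)
          ++ pvFlat text rest (off + 1), off ≤ a := by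
        intro a ha
        rcases List.mem_append.mp ha with h1 | h2
        · obtain ⟨kw', _, hkw'⟩ := List.mem_filterMap.mp h1
          split at hkw'
          · exact Nat.le_of_eq (Option.some.inj hkw')
          · exact absurd hkw' (by simp)
        · exact Nat.le_of_succ_le (pvFlat_lb text rest (off + 1) a h2)
      cases e : PySem.List.min? (g.1.filterMap (fun kw => if PySem.Str.isIn kw text then some off else none)
          ++ pvFlat text rest (off + 1)) (fun x => x) with
      | none =>
        have := (PySem.List.min?_eq_none_iff _ _).mp e
        rw [this] at hoff; simp at hoff
      | some m =>
        have hm := PySem.List.min?_mem e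
        have h1 : off ≤ m := hlb m hm
        have h2 : m ≤ off := PySem.List.min?_isMin e off hoff
        exact congrArg some (Nat.le_antisymm h1 h2).symm
    · rw [if_neg h]
      have hnil : g.1.filterMap (fun kw => if PySem.Str.isIn kw text then some off else none) = [] := by
        rw [List.filterMap_eq_nil_iff]
        intro kw hkw
        have hf : PySem.Str.isIn kw text = false := by
          rcases Bool.eq_false_or_eq_true (PySem.Str.isIn kw text) with hb | hb
          · exact absurd (List.any_eq_true.mpr ⟨kw, hkw, hb⟩) h
          · exact hb
        simp only [hf, Bool.false_eq_true, if_false]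
      rw [hnil, List.nil_append]
      exact ih (off + 1)

theorem pvFlat_concrete (text : String) :
    pvPairs.filterMap (fun p => if PySem.Str.isIn p.1 text then some p.2 else none)
      = pvFlat text pvGroups 0 := by
  rw [← pvPairsOf_groups, pvFlat_eq_filterMap]

-- ===== VERDICT (by name: the statement is the Claim_ definition above) =====
theorem get_fallback_description_py_spec : Claim_equal_get_fallback_description_py := by
  intro s _
  unfold Spec_get_fallback_description_py get_fallback_description_py get_fallback_description_py_alt
  by_cases hs : s = ""
  · simp [hs]
  · simp only [hs, if_false, pvFlat_concrete, pvMin_flat_eq]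
    simp only [pvFirstIdx, pvGroups]
    split_ifs <;> simp [pvDescriptions]
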